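-- pv_equiv track=rewrite | github.com/susunini/leetcode | 132_Palindrome_Partitioning_II.py | getPalindromeMatrix
-- ===== SOURCE A (Python) =====
-- def getPalindromeMatrix(s):
--     n = len(s)
--     dp = [[False] * n for _ in range(n)]
--     for i in range(n-1, -1, -1): # Wrong: for i in range(n)
--         for j in range(i, n):
--             if i == j:
--                 dp[i][j] = True
--             elif j - i == 1:
--                 dp[i][j] = (s[i] == s[j])
--             else:
--                 dp[i][j] = (s[i] == s[j]) and dp[i+1][j-1]
--     return dp
-- ===== SOURCE B (Python) =====
-- def getPalindromeMatrix(s):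
--     n = len(s)
--     return [[i <= j and s[i:j+1] == s[i:j+1][::-1] for j in range(n)]
--             for i in range(n)]
-- ===== Notes on version B (the rewrite author's own statement) =====
-- stated objective: simpler
-- what changed: Replaces the bottom-up interval DP with a direct per-cell palindrome test (substring equals its reverse) built in one nested comprehension, with no table dependencies.
import Mathlib
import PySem

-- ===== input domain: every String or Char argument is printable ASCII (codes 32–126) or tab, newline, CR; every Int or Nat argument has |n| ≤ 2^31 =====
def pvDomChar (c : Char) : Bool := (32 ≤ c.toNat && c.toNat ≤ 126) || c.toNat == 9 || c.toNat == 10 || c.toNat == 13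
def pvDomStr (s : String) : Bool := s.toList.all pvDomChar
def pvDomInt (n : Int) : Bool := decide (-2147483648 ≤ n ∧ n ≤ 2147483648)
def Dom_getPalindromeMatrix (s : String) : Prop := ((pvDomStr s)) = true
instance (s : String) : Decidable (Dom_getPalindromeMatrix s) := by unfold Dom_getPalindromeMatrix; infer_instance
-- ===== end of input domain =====

-- B replaces the bottom-up interval DP with a direct per-cell palindrome test
-- (substring equals its reverse); same return value, no mutation involved.

-- ===== PORT A =====
-- dp[i][j] read / in-place write of the Python list-of-lists (indices always in range here)
def pvGetCell (dp : List (List Bool)) (i j : Nat) : Bool := (dp.getD i []).getD j false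
def pvSetCell (dp : List (List Bool)) (i j : Nat) (v : Bool) : List (List Bool) :=
  dp.set i ((dp.getD i []).set j v)

def getPalindromeMatrix (s : String) : List (List Bool) :=
  let cs := s.toList
  let n := cs.length
  let dp0 := (List.range n).map (fun _ => List.replicate n false)
  -- for i in range(n-1, -1, -1): for j in range(i, n): …  (all indices are in 0..n-1)
  ((List.range n).reverse).foldl (fun dp i =>
    (List.range' i (n - i)).foldl (fun dp j =>
      let v :=
        if i = j then true
        else if j - i = 1 then (cs.getD i ' ' == cs.getD j ' ')
        else (cs.getD i ' ' == cs.getD j ' ') && pvGetCell dp (i+1) (j-1)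
      pvSetCell dp i j v) dp) dp0

-- ===== PORT B =====
-- [[i <= j and s[i:j+1] == s[i:j+1][::-1] for j in range(n)] for i in range(n)]
-- (s[i:j+1] via PySem.List.slice on the char list; [::-1] is .reverse)
def getPalindromeMatrix_alt (s : String) : List (List Bool) :=
  let cs := s.toList
  let n := cs.length
  (List.range n).map (fun (i : Nat) =>
    (List.range n).map (fun (j : Nat) =>
      decide (i ≤ j) &&
        (PySem.List.slice cs (some (i : Int)) (some ((j : Int) + 1)) ==
         (PySem.List.slice cs (some (i : Int)) (some ((j : Int) + 1))).reverse)))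

-- ===== PRECONDITION & SPEC =====
def Spec_getPalindromeMatrix (s : String) (out : List (List Bool)) : Prop := out = getPalindromeMatrix_alt s
instance (s : String) (out : List (List Bool)) : Decidable (Spec_getPalindromeMatrix s out) := by unfold Spec_getPalindromeMatrix; infer_instance

-- ===== CLAIM (what is proved, stated in full; the proofs are below) =====
def Claim_equal_getPalindromeMatrix : Prop := ∀ (s : String), Dom_getPalindromeMatrix s → Spec_getPalindromeMatrix s (getPalindromeMatrix s)

-- ===== LEMMAS AND PROOFS =====

-- the palindrome predicate on the substring cs[i:j+1] (natural indices)
def pvPal (cs : List Char) (i j : Nat) : Bool :=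
  decide ((cs.drop i).take (j + 1 - i) = ((cs.drop i).take (j + 1 - i)).reverse)

-- the inner-loop step of port A, named for the proofs (zeta-equal to the port's lambda)
def pvStep (cs : List Char) (m : Nat) (dp : List (List Bool)) (j : Nat) : List (List Bool) :=
  pvSetCell dp m j
    (if m = j then true
     else if j - m = 1 then (cs.getD m ' ' == cs.getD j ' ')
     else (cs.getD m ' ' == cs.getD j ' ') && pvGetCell dp (m+1) (j-1))

def pvRow (cs : List Char) (n i : Nat) : List Bool :=
  (List.range n).map (fun j => decide (i ≤ j) && pvPal cs i j)

-- row m of the matrix while the inner loop has filled columns m..t-1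
def pvRowP (cs : List Char) (n m t : Nat) : List Bool :=
  (List.range n).map (fun j => if m ≤ j ∧ j < t then pvPal cs m j else false)

-- the matrix while the outer loop works on row m, inner loop at column t
def pvDmat (cs : List Char) (n m t : Nat) : List (List Bool) :=
  (List.range n).map (fun k =>
    if k < m then List.replicate n false
    else if k = m then pvRowP cs n m t
    else pvRow cs n k)

-- the matrix after the outer loop has finished rows m..n-1
def pvOD (cs : List Char) (n m : Nat) : List (List Bool) :=
  (List.range n).map (fun k => if k < m then List.replicate n false else pvRow cs n k)

lemma pvPal_decomp (a b : Char) (l : List Char) :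
    decide (a :: (l ++ [b]) = (a :: (l ++ [b])).reverse) = ((a == b) && decide (l = l.reverse)) := by
  simp only [List.reverse_cons, List.reverse_append]
  by_cases h : a = b
  · subst h
    simp [List.cons.injEq]
  · simp [List.cons.injEq, h]

lemma pvSub_cons (cs : List Char) (i j : Nat) (hij : i ≤ j) (hj : j < cs.length) :
    (cs.drop i).take (j + 1 - i) = cs.getD i ' ' :: (cs.drop (i+1)).take (j - i) := by
  have hi : i < cs.length := lt_of_le_of_lt hij hj
  rw [List.drop_eq_getElem_cons hi, List.getD_eq_getElem cs ' ' hi]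
  have e : j + 1 - i = (j - i) + 1 := by omega
  rw [e, List.take_succ_cons]

lemma pvSub_concat (cs : List Char) (i j : Nat) (hij : i ≤ j) (hj : j < cs.length) :
    (cs.drop i).take (j + 1 - i) = (cs.drop i).take (j - i) ++ [cs.getD j ' '] := by
  have e : j + 1 - i = (j - i) + 1 := by omega
  rw [e, List.take_add_one]
  congr 1
  have h : (cs.drop i)[j - i]? = some (cs.getD j ' ') := by
    rw [List.getElem?_drop]
    have e2 : i + (j - i) = j := by omega
    rw [e2, List.getElem?_eq_getElem hj, List.getD_eq_getElem cs ' ' hj]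
  rw [h]
  rfl

lemma pvPal_diag (cs : List Char) (i : Nat) (hi : i < cs.length) : pvPal cs i i = true := by
  unfold pvPal
  rw [pvSub_cons cs i i le_rfl hi]
  simp

lemma pvPal_adj (cs : List Char) (i : Nat) (hi : i + 1 < cs.length) :
    pvPal cs i (i+1) = (cs.getD i ' ' == cs.getD (i+1) ' ') := by
  unfold pvPal
  rw [pvSub_cons cs i (i+1) (by omega) hi]
  have e : i + 1 - i = i + 1 + 1 - (i + 1) := by omega
  rw [e, pvSub_concat cs (i+1) (i+1) le_rfl hi]
  simp only [Nat.sub_self, List.take_zero, List.nil_append]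
  rw [Bool.beq_eq_decide_eq, decide_eq_decide]
  simp only [List.reverse_cons, List.reverse_nil, List.nil_append, List.cons_append,
    List.cons.injEq, and_true]
  exact ⟨fun hh => hh.1, fun hh => ⟨hh, hh.symm⟩⟩

lemma pvPal_step (cs : List Char) (i j : Nat) (hij : i + 1 < j) (hj : j < cs.length) :
    pvPal cs i j = ((cs.getD i ' ' == cs.getD j ' ') && pvPal cs (i+1) (j-1)) := by
  unfold pvPal
  rw [pvSub_cons cs i j (by omega) hj]
  have e1 : j - i = j + 1 - (i + 1) := by omega
  rw [e1, pvSub_concat cs (i+1) j (by omega) hj]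
  have e2 : j - 1 + 1 - (i + 1) = j - (i + 1) := by omega
  rw [e2]
  exact pvPal_decomp _ _ _

lemma pvSet_map_range {β : Type} (f : Nat → β) (n t : Nat) (v : β) :
    ((List.range n).map f).set t v
      = (List.range n).map (fun j => if j = t then v else f j) := by
  apply List.ext_getElem
  · simp
  · intro k h1 h2
    simp only [List.getElem_set, List.getElem_map, List.getElem_range]
    by_cases h : t = k
    · rw [if_pos h, if_pos h.symm]
    · rw [if_neg h, if_neg (fun hh => h hh.symm)]

lemma pvStep_eq (cs : List Char) (n m t : Nat) (hn : n = cs.length)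
    (hm : m < n) (hmt : m ≤ t) (htn : t < n) :
    pvStep cs m (pvDmat cs n m t) t = pvDmat cs n m (t+1) := by
  have hv : (if m = t then true
             else if t - m = 1 then (cs.getD m ' ' == cs.getD t ' ')
             else (cs.getD m ' ' == cs.getD t ' ') && pvGetCell (pvDmat cs n m t) (m+1) (t-1))
            = pvPal cs m t := by
    by_cases h : m = t
    · simp [h, pvPal_diag cs t (by omega)]
    · by_cases h1 : t - m = 1
      · have he : t = m + 1 := by omega
        subst he
        rw [if_neg h, if_pos h1, pvPal_adj cs m (by omega)]
      · have hmt2 : m + 1 < t := by omega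
        have hcell : pvGetCell (pvDmat cs n m t) (m+1) (t-1) = pvPal cs (m+1) (t-1) := by
          unfold pvGetCell
          have hget : (pvDmat cs n m t).getD (m+1) [] = pvRow cs n (m+1) := by
            unfold pvDmat
            rw [PySem.List.getD_map_range _ n (m+1) [] (by omega)]
            simp [show ¬ (m + 1 < m) by omega]
          rw [hget]
          unfold pvRow
          rw [PySem.List.getD_map_range _ n (t-1) false (by omega)]
          rw [decide_eq_true (show m + 1 ≤ t - 1 by omega), Bool.true_and]
        rw [if_neg h, if_neg h1, hcell, pvPal_step cs m t hmt2 (by omega)]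
  unfold pvStep
  rw [hv]
  unfold pvSetCell
  have hget : (pvDmat cs n m t).getD m [] = pvRowP cs n m t := by
    unfold pvDmat
    rw [PySem.List.getD_map_range _ n m [] (by omega)]
    simp
  rw [hget]
  have hrow : (pvRowP cs n m t).set t (pvPal cs m t) = pvRowP cs n m (t+1) := by
    unfold pvRowP
    rw [pvSet_map_range]
    apply List.map_congr_left
    intro j _
    by_cases hj : j = t
    · subst hj
      simp [hmt]
    · have e : (m ≤ j ∧ j < t) ↔ (m ≤ j ∧ j < t + 1) := by omega
      simp [hj, e]
  rw [hrow]
  unfold pvDmat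
  rw [pvSet_map_range]
  apply List.map_congr_left
  intro k _
  by_cases hk : k = m
  · subst hk
    simp
  · simp [hk]

lemma pvInner (cs : List Char) (n m : Nat) (hn : n = cs.length) (hm : m < n) :
    ∀ (cnt t : Nat), m ≤ t → t + cnt = n →
      (List.range' t cnt).foldl (pvStep cs m) (pvDmat cs n m t) = pvDmat cs n m n := by
  intro cnt
  induction cnt with
  | zero =>
    intro t hmt ht
    have : t = n := by omega
    subst this
    simp
  | succ c ih =>
    intro t hmt ht
    rw [List.range'_succ, List.foldl_cons, pvStep_eq cs n m t hn hm hmt (by omega)]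
    exact ih (t+1) (by omega) (by omega)

lemma pvRowP_full (cs : List Char) (n m : Nat) :
    pvRowP cs n m n = pvRow cs n m := by
  unfold pvRowP pvRow
  apply List.map_congr_left
  intro j hj
  rw [List.mem_range] at hj
  by_cases h : m ≤ j
  · simp [h, hj]
  · simp [h]

lemma pvRowP_empty (cs : List Char) (n m : Nat) :
    pvRowP cs n m m = List.replicate n false := by
  unfold pvRowP
  rw [List.eq_replicate_iff]
  refine ⟨by simp, ?_⟩
  intro b hb
  simp only [List.mem_map] at hb
  obtain ⟨j, _, hj⟩ := hb
  have h : ¬ (m ≤ j ∧ j < m) := by omega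
  rw [if_neg h] at hj
  exact hj.symm

lemma pvDmat_start (cs : List Char) (n m : Nat) :
    pvDmat cs n m m = pvOD cs n (m+1) := by
  unfold pvDmat pvOD
  apply List.map_congr_left
  intro k _
  by_cases h : k < m
  · simp [h, show k < m + 1 by omega]
  · by_cases h2 : k = m
    · subst h2
      simp [pvRowP_empty, show k < k + 1 by omega]
    · simp [h, h2, show ¬ (k < m + 1) by omega]

lemma pvDmat_end (cs : List Char) (n m : Nat) :
    pvDmat cs n m n = pvOD cs n m := by
  unfold pvDmat pvOD
  apply List.map_congr_left
  intro k _
  by_cases h : k < m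
  · simp [h]
  · by_cases h2 : k = m
    · subst h2
      simp [pvRowP_full]
    · simp [h, h2]

lemma pvOuter (cs : List Char) (n : Nat) (hn : n = cs.length) :
    ∀ (m : Nat), m ≤ n →
      ((List.range m).reverse).foldl
        (fun dp i => (List.range' i (n - i)).foldl (pvStep cs i) dp) (pvOD cs n m)
      = pvOD cs n 0 := by
  intro m
  induction m with
  | zero => intro _; simp
  | succ k ih =>
    intro hk
    rw [List.range_succ, List.reverse_append]
    simp only [List.reverse_singleton, List.singleton_append, List.foldl_cons]
    have hstep : (List.range' k (n - k)).foldl (pvStep cs k) (pvOD cs n (k+1)) = pvOD cs n k := by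
      rw [← pvDmat_start cs n k, ← pvDmat_end cs n k]
      exact pvInner cs n k hn (by omega) (n - k) k le_rfl (by omega)
    rw [hstep]
    exact ih (by omega)

lemma pvOD_init (cs : List Char) (n : Nat) :
    (List.range n).map (fun _ => List.replicate n false) = pvOD cs n n := by
  unfold pvOD
  apply List.map_congr_left
  intro k hk
  rw [List.mem_range] at hk
  simp [hk]

lemma pvAlt_eq (s : String) :
    getPalindromeMatrix_alt s = pvOD s.toList s.toList.length 0 := by
  unfold getPalindromeMatrix_alt
  dsimp only
  unfold pvOD
  apply List.map_congr_left
  intro i _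
  simp only [Nat.not_lt_zero, if_false]
  unfold pvRow
  apply List.map_congr_left
  intro j _
  congr 1
  unfold pvPal
  have hc : ((j : Int) + 1) = ((j + 1 : Nat) : Int) := by push_cast; ring
  rw [hc, PySem.List.slice_natCast, Bool.beq_eq_decide_eq]

-- ===== VERDICT (by name: the statement is the Claim_ definition above) =====
theorem getPalindromeMatrix_spec : Claim_equal_getPalindromeMatrix := by
  intro s _
  unfold Spec_getPalindromeMatrix
  rw [pvAlt_eq]
  simp only [getPalindromeMatrix]
  rw [pvOD_init s.toList s.toList.length]
  exact pvOuter s.toList s.toList.length rfl s.toList.length le_rfl
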